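-- pv_equiv track=rewrite | github.com/hannahfriedman/PermStats | temp.py | two_sets
-- ===== SOURCE A (Python) =====
-- def two_sets(n: int) -> int:
--     count = 0
--     for j in range(1, n):
--         for i in range(j+1, n+1):
--             for k in range(j+1, n):
--                 for l in range(k+1, n+1):
--                     if i != l:
--                         count += 1
--     return count
-- ===== SOURCE B (Python) =====
-- def two_sets(n: int) -> int:
--     # closed form: sum_{j=1}^{n-1} (n-j-1) * C(n-j, 2), evaluated analytically
--     if n < 3:
--         return 0
--     return n * (n - 1) * (n - 2) * (3 * n - 5) // 24
-- ===== Notes on version B (the rewrite author's own statement) =====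
-- stated objective: faster
-- what changed: Replaced the four nested loops by the closed-form polynomial n(n-1)(n-2)(3n-5)/24 obtained by evaluating the nested sums analytically.
import Mathlib
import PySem

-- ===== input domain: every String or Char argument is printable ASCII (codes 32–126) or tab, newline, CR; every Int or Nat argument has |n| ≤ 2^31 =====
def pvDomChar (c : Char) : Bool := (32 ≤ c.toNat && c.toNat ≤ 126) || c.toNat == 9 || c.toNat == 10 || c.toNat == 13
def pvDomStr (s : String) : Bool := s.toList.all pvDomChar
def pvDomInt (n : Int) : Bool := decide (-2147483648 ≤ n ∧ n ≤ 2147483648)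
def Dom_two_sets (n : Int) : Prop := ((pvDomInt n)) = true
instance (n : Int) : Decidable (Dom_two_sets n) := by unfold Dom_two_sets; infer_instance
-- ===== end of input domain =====

-- B replaces A's four nested loops by the closed-form polynomial n(n-1)(n-2)(3n-5)//24 (objective: faster).

-- ===== PORT A =====
def two_sets (n : Int) : Int :=
  (PySem.List.pyRange 1 n 1).foldl (fun count j =>
    (PySem.List.pyRange (j+1) (n+1) 1).foldl (fun count i =>
      (PySem.List.pyRange (j+1) n 1).foldl (fun count k =>
        (PySem.List.pyRange (k+1) (n+1) 1).foldl (fun count l =>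
          if i ≠ l then count + 1 else count) count) count) count) 0

-- ===== PORT B =====
def two_sets_alt (n : Int) : Int :=
  if n < 3 then 0 else PySem.Int.floordiv (n * (n - 1) * (n - 2) * (3 * n - 5)) 24

-- ===== PRECONDITION & SPEC =====
def Spec_two_sets (n : Int) (out : Int) : Prop := out = two_sets_alt n
instance (n : Int) (out : Int) : Decidable (Spec_two_sets n out) := by unfold Spec_two_sets; infer_instance

-- ===== CLAIM (what is proved, stated in full; the proofs are below) =====
def Claim_equal_two_sets : Prop := ∀ (n : Int), Dom_two_sets n → Spec_two_sets n (two_sets n)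

-- ===== LEMMAS AND PROOFS =====

-- tri s = 0 + 1 + … + (s-1)
def tri : Nat → Int
  | 0 => 0
  | s + 1 => tri s + s

lemma two_mul_tri (s : Nat) : 2 * tri s = (s : Int) * (s - 1) := by
  induction s with
  | zero => simp [tri]
  | succ t ih =>
    simp only [tri]
    push_cast
    linear_combination ih

-- innermost loop: for l in range(a, a+m): if i != l: count += 1
lemma sumL (m : Nat) (a i c : Int) :
    (PySem.List.pyRange a (a + m) 1).foldl
      (fun count l => if i ≠ l then count + 1 else count) c
      = c + m - (if a ≤ i ∧ i < a + m then 1 else 0) := by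
  induction m generalizing c with
  | zero =>
    rw [PySem.List.pyRange_one_eq_nil (by omega : a + ((0:Nat):Int) ≤ a)]
    simp only [List.foldl]
    split_ifs <;> omega
  | succ t ih =>
    have hcast : a + ((t + 1 : Nat) : Int) = (a + t) + 1 := by push_cast; ring
    rw [hcast, PySem.List.pyRange_one_succ_right (by omega : a ≤ a + (t:Int)),
        List.foldl_append, ih]
    simp only [List.foldl]
    push_cast
    split_ifs <;> omega

-- k loop after the l-loop is summed: count += (n-k) - [k < i]
lemma sumK (m : Nat) (a i n c : Int) (hai : a ≤ i) :
    (PySem.List.pyRange a (a + m) 1).foldl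
      (fun count k => count + (n - k) - (if k < i then 1 else 0)) c
      = c + m * (n - a) - tri m - min (i - a) m := by
  induction m generalizing c with
  | zero =>
    rw [PySem.List.pyRange_one_eq_nil (by omega : a + ((0:Nat):Int) ≤ a)]
    simp only [List.foldl, tri]
    push_cast
    omega
  | succ t ih =>
    have hcast : a + ((t + 1 : Nat) : Int) = (a + t) + 1 := by push_cast; ring
    rw [hcast, PySem.List.pyRange_one_succ_right (by omega : a ≤ a + (t:Int)),
        List.foldl_append, ih]
    simp only [List.foldl, tri]
    have hexp : ((t + 1 : Nat) : Int) * (n - a) = (t : Int) * (n - a) + (n - a) := by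
      push_cast; ring
    rw [hexp]
    push_cast
    split_ifs <;> omega

-- i loop with the summed inner value: count += M - (i - a)
lemma sumI (t : Nat) (a c M : Int) :
    (PySem.List.pyRange a (a + t) 1).foldl
      (fun count i => count + M - (i - a)) c
      = c + t * M - tri t := by
  induction t generalizing c with
  | zero =>
    rw [PySem.List.pyRange_one_eq_nil (by omega : a + ((0:Nat):Int) ≤ a)]
    simp only [List.foldl, tri]
    push_cast
    omega
  | succ s ih =>
    have hcast : a + ((s + 1 : Nat) : Int) = (a + s) + 1 := by push_cast; ring
    rw [hcast, PySem.List.pyRange_one_succ_right (by omega : a ≤ a + (s:Int)),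
        List.foldl_append, ih]
    simp only [List.foldl, tri]
    have hexp : ((s + 1 : Nat) : Int) * M = (s : Int) * M + M := by push_cast; ring
    rw [hexp]
    omega

-- per-j contribution, with m = n - j - 1
def fG (m : Nat) : Int := (m + 1) * ((m : Int) * m - tri m) - tri (m + 1)

-- running total of the outer loop
def Q : Nat → Int
  | 0 => 0
  | t + 1 => fG t + Q t

-- outer j loop, consumed front to back: j = w-t, …, w-1 contributes fG (w-j-1)
lemma sumJ (t : Nat) (w c : Int) :
    (PySem.List.pyRange (w - t) w 1).foldl
      (fun count j => count + fG (w - j - 1).toNat) c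
      = c + Q t := by
  induction t generalizing c with
  | zero =>
    rw [PySem.List.pyRange_one_eq_nil (by omega : w ≤ w - ((0:Nat):Int))]
    simp [Q]
  | succ s ih =>
    rw [PySem.List.pyRange_one_cons (by omega : w - ((s+1 : Nat) : Int) < w)]
    simp only [List.foldl]
    have harg : w - ((s + 1 : Nat) : Int) + 1 = w - (s : Nat) := by push_cast; ring
    rw [harg, ih]
    have hG : (w - (w - ((s + 1 : Nat) : Int)) - 1).toNat = s := by
      push_cast; omega
    rw [hG]
    simp only [Q]
    ring

-- the whole body of A's j-loop equals fG (n-j-1).toNat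
lemma body_j (n j : Int) (_h1 : 1 ≤ j) (h2 : j < n) (count : Int) :
    (PySem.List.pyRange (j+1) (n+1) 1).foldl (fun count i =>
      (PySem.List.pyRange (j+1) n 1).foldl (fun count k =>
        (PySem.List.pyRange (k+1) (n+1) 1).foldl (fun count l =>
          if i ≠ l then count + 1 else count) count) count) count
      = count + fG (n - j - 1).toNat := by
  set m : Nat := (n - j - 1).toNat with hm
  have hmn : (m : Int) = n - j - 1 := by omega
  -- rewrite the i-loop body pointwise
  have hI : ∀ (acc i : Int), i ∈ PySem.List.pyRange (j+1) (n+1) 1 →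
      (PySem.List.pyRange (j+1) n 1).foldl (fun count k =>
        (PySem.List.pyRange (k+1) (n+1) 1).foldl (fun count l =>
          if i ≠ l then count + 1 else count) count) acc
      = acc + ((m : Int) * (m : Int) - tri m) - (i - (j+1)) := by
    intro acc i hi
    rw [PySem.List.mem_pyRange_one] at hi
    -- rewrite the k-loop body pointwise using sumL
    have hK : ∀ (acc2 k : Int), k ∈ PySem.List.pyRange (j+1) n 1 →
        (PySem.List.pyRange (k+1) (n+1) 1).foldl (fun count l =>
          if i ≠ l then count + 1 else count) acc2
        = acc2 + (n - k) - (if k < i then 1 else 0) := by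
      intro acc2 k hk
      rw [PySem.List.mem_pyRange_one] at hk
      have hnk : n + 1 = (k + 1) + ((n - k).toNat : Int) := by omega
      rw [hnk, sumL]
      have : ((n - k).toNat : Int) = n - k := by omega
      rw [this]
      split_ifs <;> omega
    rw [PySem.List.foldl_congr_mem _ _ (fun count k => count + (n - k) - (if k < i then 1 else 0)) _ hK]
    have hrange : PySem.List.pyRange (j+1) n 1 = PySem.List.pyRange (j+1) ((j+1) + (m : Int)) 1 := by
      rw [show (j+1) + (m : Int) = n by omega]
    rw [hrange, sumK m (j+1) i n acc (by omega)]
    have hmin : min (i - (j+1)) (m : Int) = i - (j+1) := by omega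
    rw [hmin]
    linear_combination (-(m : Int)) * hmn
  rw [PySem.List.foldl_congr_mem _ _ (fun count i => count + ((m : Int) * (m : Int) - tri m) - (i - (j+1))) _ hI]
  have hrange : n + 1 = (j + 1) + ((m + 1 : Nat) : Int) := by push_cast; omega
  rw [hrange, sumI (m+1) (j+1) count ((m : Int) * (m : Int) - tri m)]
  simp only [fG]
  push_cast
  ring

-- A's loop nest evaluates to Q (n-1).toNat
lemma two_sets_eq_Q (n : Int) : two_sets n = Q (n - 1).toNat := by
  unfold two_sets
  by_cases hn : n ≤ 1
  · rw [PySem.List.pyRange_one_eq_nil hn]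
    have : (n - 1).toNat = 0 := by omega
    rw [this]
    simp [Q]
  · rw [not_le] at hn
    have hJ : ∀ (acc j : Int), j ∈ PySem.List.pyRange 1 n 1 →
        (PySem.List.pyRange (j+1) (n+1) 1).foldl (fun count i =>
          (PySem.List.pyRange (j+1) n 1).foldl (fun count k =>
            (PySem.List.pyRange (k+1) (n+1) 1).foldl (fun count l =>
              if i ≠ l then count + 1 else count) count) count) acc
        = acc + fG (n - j - 1).toNat := by
      intro acc j hj
      rw [PySem.List.mem_pyRange_one] at hj
      exact body_j n j hj.1 hj.2 acc
    rw [PySem.List.foldl_congr_mem _ _ (fun count j => count + fG (n - j - 1).toNat) _ hJ]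
    have hstart : PySem.List.pyRange 1 n 1 = PySem.List.pyRange (n - ((n - 1).toNat : Int)) n 1 := by
      rw [show n - ((n - 1).toNat : Int) = 1 by omega]
    rw [hstart, sumJ]
    omega

-- closed form for Q
lemma Q_poly (t : Nat) : 24 * Q t = ((t : Int) + 1) * t * ((t : Int) - 1) * (3 * t - 2) := by
  induction t with
  | zero => simp [Q]
  | succ s ih =>
    simp only [Q, fG, tri]
    have h := two_mul_tri s
    push_cast at h ⊢
    linear_combination ih - (12 * (s : Int) + 24) * h

-- ===== VERDICT (by name: the statement is the Claim_ definition above) =====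
theorem two_sets_spec : Claim_equal_two_sets := by
  unfold Claim_equal_two_sets Spec_two_sets
  intro n _
  rw [two_sets_eq_Q]
  unfold two_sets_alt
  by_cases h3 : n < 3
  · rw [if_pos h3]
    have h01 : (n - 1).toNat = 0 ∨ (n - 1).toNat = 1 := by omega
    rcases h01 with h | h <;> rw [h] <;> simp [Q, fG, tri]
  · rw [if_neg h3]
    rw [not_lt] at h3
    have ht : ((n - 1).toNat : Int) = n - 1 := by omega
    have hQ := Q_poly (n - 1).toNat
    rw [ht] at hQ
    have hX : n * (n - 1) * (n - 2) * (3 * n - 5) = 24 * Q (n - 1).toNat := by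
      rw [hQ]; ring
    rw [hX, PySem.Int.floordiv_eq_ediv_of_pos (by norm_num)]
    rw [Int.mul_ediv_cancel_left _ (by norm_num : (24:Int) ≠ 0)]
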